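-- pv_equiv track=rewrite | github.com/LuigiOdinson/Advent_Of_Code | 2021/Day3/solve.py | power_consumption
-- ===== SOURCE A (Python) =====
-- def power_consumption(nl):
--     gamma_rate, epsilon_rate = str(), str()
--
--     for pos in range(len(nl[0])):
--         nums_at_pos = [int(num[pos]) for num in nl]
--         if sum(nums_at_pos) > len(nl) // 2:
--             gamma_rate += "1"
--             epsilon_rate += "0"
--         else:
--             gamma_rate += "0"
--             epsilon_rate += "1"
--
--     gamma_rate = int(gamma_rate, 2)
--     epsilon_rate = int(epsilon_rate, 2)
--
--     return gamma_rate * epsilon_rate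
-- ===== SOURCE B (Python) =====
-- def power_consumption(nl):
--     # One row-major pass: add each row's digits into a per-column counts vector,
--     # then fold the counts into gamma and take epsilon as gamma's width-bit complement.
--     half = len(nl) // 2
--     counts = [0] * len(nl[0])
--     for num in nl:
--         counts = [c + int(num[i]) for i, c in enumerate(counts)]
--     gamma = 0
--     for c in counts:
--         gamma = 2 * gamma + (1 if c > half else 0)
--     return gamma * ((1 << len(nl[0])) - 1 - gamma)
-- ===== Notes on version B (the rewrite author's own statement) =====
-- stated objective: alternative
-- what changed: B inverts the traversal: a single row-major pass adds each row's digits into a per-column counts vector (A's inner scan over all rows per column disappears), then one fold over the counts builds gamma as an integer and epsilon is the closed-form width-bit complement, instead of A's column-major loop building two parallel bit-strings parsed with int(.,2).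
import Mathlib
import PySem

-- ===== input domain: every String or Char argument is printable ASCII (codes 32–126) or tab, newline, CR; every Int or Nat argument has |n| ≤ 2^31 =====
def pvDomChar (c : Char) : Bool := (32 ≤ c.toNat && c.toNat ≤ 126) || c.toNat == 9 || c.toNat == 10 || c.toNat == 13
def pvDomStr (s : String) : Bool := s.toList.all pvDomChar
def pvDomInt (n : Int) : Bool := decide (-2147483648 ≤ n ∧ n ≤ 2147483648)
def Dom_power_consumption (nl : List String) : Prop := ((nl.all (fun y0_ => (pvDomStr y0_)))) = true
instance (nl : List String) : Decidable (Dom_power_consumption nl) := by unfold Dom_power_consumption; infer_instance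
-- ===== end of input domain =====

-- B replaces A's column-major double pass (per column, scan all rows, build two parallel
-- bit-strings, parse both with int(.,2)) by one row-major pass into a per-column counts
-- vector, a fold of the counts into an integer gamma, and epsilon as gamma's width-bit
-- complement (objective: alternative decomposition).

-- ===== PORT A =====
-- int(num[pos]) for a 1-character access: IndexError/ValueError are the `none` cases, Pre_ excludes them
def pcIntAt (num : String) (pos : Int) : Int :=
  ((PySem.Str.pyGet? num pos).bind (fun c => PySem.Int.ofChars? [c])).getD 0

-- hand port of int(s, 2): MSB-first fold over the characters; exact on the nonempty all-'0'/'1'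
-- strings gamma_rate/epsilon_rate always are under Pre_ (no sign/space/prefix/'_' cases arise)
def pcParseBin (cs : List Char) : Int :=
  cs.foldl (fun a c => 2 * a + (if c = '1' then 1 else 0)) 0

def power_consumption (nl : List String) : Int :=
  let ge := (PySem.List.pyRange 0 ((nl.headD "").toList.length : Int) 1).foldl
    (fun (p : List Char × List Char) pos =>
      let nums_at_pos := nl.map (fun num => pcIntAt num pos)
      if nums_at_pos.sum > PySem.Int.floordiv (nl.length : Int) 2
      then (p.1 ++ ['1'], p.2 ++ ['0'])
      else (p.1 ++ ['0'], p.2 ++ ['1']))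
    ([], [])
  pcParseBin ge.1 * pcParseBin ge.2

-- ===== PORT B =====
-- Source B's int(num[i]) is the same expression A also contains, so B reuses the pcIntAt helper
def power_consumption_alt (nl : List String) : Int :=
  let half := PySem.Int.floordiv (nl.length : Int) 2
  let counts : List Int := nl.foldl
    (fun counts num => (PySem.List.enumerate counts).map (fun p => p.2 + pcIntAt num p.1))
    (List.replicate (nl.headD "").toList.length 0)
  let gamma : Int := counts.foldl (fun g c => 2 * g + (if c > half then 1 else 0)) 0
  gamma * ((1 : Int) <<< (nl.headD "").toList.length - 1 - gamma)

-- ===== PRECONDITION & SPEC =====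
-- Pre_ = exactly where A returns: nl nonempty (else nl[0] IndexError), nl[0] nonempty (else
-- int('', 2) ValueError), and every string has a decimal digit at each position < len(nl[0])
-- (else IndexError / ValueError from int(num[pos])).
def Pre_power_consumption (nl : List String) : Prop :=
  nl ≠ [] ∧ (nl.headD "").toList ≠ [] ∧
  ∀ s ∈ nl, (nl.headD "").toList.length ≤ s.toList.length ∧
    ((s.toList.take (nl.headD "").toList.length).all Char.isDigit) = true
instance (nl : List String) : Decidable (Pre_power_consumption nl) := by
  unfold Pre_power_consumption; infer_instance
def pvWitness_power_consumption : List String := ["101", "110", "011"]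

def Spec_power_consumption (nl : List String) (out : Int) : Prop := out = power_consumption_alt nl
instance (nl : List String) (out : Int) : Decidable (Spec_power_consumption nl out) := by unfold Spec_power_consumption; infer_instance

-- ===== CLAIM (what is proved, stated in full; the proofs are below) =====
def Claim_equal_power_consumption : Prop := ∀ (nl : List String), Dom_power_consumption nl → Pre_power_consumption nl → Spec_power_consumption nl (power_consumption nl)

-- ===== LEMMAS AND PROOFS =====

-- appending one bit character doubles the parsed value (and adds the bit)
theorem pcParseBin_append_one (cs : List Char) :
    pcParseBin (cs ++ ['1']) = 2 * pcParseBin cs + 1 := by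
  simp [pcParseBin, List.foldl_append]

theorem pcParseBin_append_zero (cs : List Char) :
    pcParseBin (cs ++ ['0']) = 2 * pcParseBin cs := by
  simp [pcParseBin, List.foldl_append]

-- A's fold over positions: the parsed gamma string follows the integer recurrence
-- G ↦ 2G + bit, and the parsed epsilon string is its bitwise complement:
-- E = 2^k * (G0 + E0 + 1) - 1 - G.
theorem pc_fold_inv (nl : List String) (ps : List Int) (g e : List Char) :
    pcParseBin ((ps.foldl
        (fun (p : List Char × List Char) pos =>
          if (nl.map (fun num => pcIntAt num pos)).sum > PySem.Int.floordiv (nl.length : Int) 2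
          then (p.1 ++ ['1'], p.2 ++ ['0'])
          else (p.1 ++ ['0'], p.2 ++ ['1'])) (g, e)).1)
      = ps.foldl
        (fun G pos =>
          2 * G + (if (nl.map (fun num => pcIntAt num pos)).sum > PySem.Int.floordiv (nl.length : Int) 2 then 1 else 0))
        (pcParseBin g)
    ∧ pcParseBin ((ps.foldl
        (fun (p : List Char × List Char) pos =>
          if (nl.map (fun num => pcIntAt num pos)).sum > PySem.Int.floordiv (nl.length : Int) 2
          then (p.1 ++ ['1'], p.2 ++ ['0'])
          else (p.1 ++ ['0'], p.2 ++ ['1'])) (g, e)).2)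
      = 2 ^ ps.length * (pcParseBin g + pcParseBin e + 1) - 1
        - ps.foldl
          (fun G pos =>
            2 * G + (if (nl.map (fun num => pcIntAt num pos)).sum > PySem.Int.floordiv (nl.length : Int) 2 then 1 else 0))
          (pcParseBin g) := by
  induction ps generalizing g e with
  | nil => simp
  | cons p ps ih =>
    by_cases h : (nl.map (fun num => pcIntAt num p)).sum > PySem.Int.floordiv (nl.length : Int) 2
    · have h1 := ih (g ++ ['1']) (e ++ ['0'])
      rw [pcParseBin_append_one, pcParseBin_append_zero] at h1
      simp only [List.foldl_cons, List.length_cons, if_pos h]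
      refine ⟨h1.1, ?_⟩
      rw [h1.2, pow_succ]
      ring
    · have h1 := ih (g ++ ['0']) (e ++ ['1'])
      rw [pcParseBin_append_one, pcParseBin_append_zero] at h1
      simp only [List.foldl_cons, List.length_cons, if_neg h, add_zero]
      refine ⟨h1.1, ?_⟩
      rw [h1.2, pow_succ]
      ring

-- one enumerate step of B's row pass, on a counts vector given pointwise by g,
-- adds that row's digit in each column
theorem pc_step (w : Nat) (g : Nat → Int) (num : String) :
    (PySem.List.enumerate ((List.range w).map g)).map (fun p => p.2 + pcIntAt num p.1)
      = (List.range w).map (fun i => g i + pcIntAt num (i : Int)) := by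
  rw [PySem.List.enumerate_eq_map_pyRange _ (0 : Int)]
  simp only [List.map_map, PySem.List.len_eq, List.length_map, List.length_range,
    PySem.List.pyRange_one, sub_zero, Int.toNat_natCast]
  apply List.map_congr_left
  intro k hk
  have hkw : k < w := List.mem_range.mp hk
  simp [PySem.List.pyGetD_natCast, hkw]

-- B's whole row pass: starting from a counts vector given pointwise by g, the result is
-- pointwise g i plus the column-i digit sum over all rows
theorem pc_counts_char (w : Nat) (nl : List String) (g : Nat → Int) :
    nl.foldl (fun counts num => (PySem.List.enumerate counts).map (fun p => p.2 + pcIntAt num p.1))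
        ((List.range w).map g)
      = (List.range w).map
          (fun i => g i + (nl.map (fun s => pcIntAt s (i : Int))).sum) := by
  induction nl generalizing g with
  | nil => simp
  | cons s nl ih =>
    simp only [List.foldl_cons]
    rw [pc_step w g s]
    rw [ih (fun i => g i + pcIntAt s (i : Int))]
    simp [add_assoc]

-- ===== VERDICT (by name: the statement is the Claim_ definition above) =====
theorem power_consumption_spec : Claim_equal_power_consumption := by
  intro nl _ hpre
  obtain ⟨hne, hhd, hlen⟩ := hpre
  unfold Spec_power_consumption power_consumption power_consumption_alt
  set w := (nl.headD "").toList.length with hw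
  -- B's counts vector, characterized column-wise
  have hrep : (List.replicate w (0 : Int)) = (List.range w).map (fun _ => (0 : Int)) := by
    simp [List.map_const']
  have hcounts := pc_counts_char w nl (fun _ => (0 : Int))
  have hA := pc_fold_inv nl (PySem.List.pyRange 0 (w : Int) 1) [] []
  rw [show pcParseBin [] = 0 from rfl] at hA
  -- both gamma folds are the same fold over the column indices
  simp only [hrep, hcounts, List.foldl_map, zero_add]
  rw [hA.1, hA.2]
  simp only [Int.shiftLeft_eq, sub_zero, Int.toNat_natCast,
    PySem.List.pyRange_one, List.foldl_map, zero_add]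
  simp only [List.length_map, List.length_range]
  ring
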